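-- pv_equiv track=rewrite | github.com/lolosoares/path_planning_multiplanners_weather | utils/file_reader.py | count_obstacles
-- ===== SOURCE A (Python) =====
-- from typing import List, Tuple, Dict, Optional
--
-- def count_obstacles(grid: List[List[str]]) -> Dict[str, int]:
--     """Conta diferentes tipos de obstáculos no mapa"""
--     counts = {
--         'buildings_X': 0,
--         'areas_A': 0,
--         'free_cells': 0
--     }
--
--     for row in grid:
--         for cell in row:
--             cell = str(cell).strip()
--             if cell in ["X", "x"]:
--                 counts['buildings_X'] += 1
--             elif cell == "A":
--                 counts['areas_A'] += 1
--             elif cell in ["0", ""]: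
--                 counts['free_cells'] += 1
--
--     return counts
-- ===== SOURCE B (Python) =====
-- from typing import List, Dict
--
-- def count_obstacles(grid: List[List[str]]) -> Dict[str, int]:
--     """Conta diferentes tipos de obstáculos no mapa"""
--     cells = [str(c).strip() for row in grid for c in row]
--     return {
--         'buildings_X': sum(1 for c in cells if c in ('X', 'x')),
--         'areas_A': cells.count('A'),
--         'free_cells': sum(1 for c in cells if c in ('0', '')),
--     }
-- ===== Notes on version B (the rewrite author's own statement) =====
-- stated objective: alternative
-- what changed: Replaces the single branching tally loop with a flatten-once comprehension followed by three independent per-category scans (sum/ count) assembled into the result dict.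
import Mathlib
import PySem

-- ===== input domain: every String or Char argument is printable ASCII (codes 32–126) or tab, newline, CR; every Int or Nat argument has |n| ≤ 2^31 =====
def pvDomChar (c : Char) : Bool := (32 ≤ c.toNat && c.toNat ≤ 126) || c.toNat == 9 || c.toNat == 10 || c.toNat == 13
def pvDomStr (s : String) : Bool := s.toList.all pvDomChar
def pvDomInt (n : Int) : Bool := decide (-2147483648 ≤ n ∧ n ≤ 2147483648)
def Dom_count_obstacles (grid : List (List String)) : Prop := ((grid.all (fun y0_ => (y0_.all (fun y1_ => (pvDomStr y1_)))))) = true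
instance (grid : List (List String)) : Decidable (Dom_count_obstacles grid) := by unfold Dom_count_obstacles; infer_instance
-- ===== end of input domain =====

-- B flattens and strips the cells once, then computes each of the three counts with its
-- own independent scan instead of A's single branching tally loop (objective: alternative).

-- ===== PORT A =====
-- counts dict has three fixed literal keys; represented as three Int accumulators
-- (buildings_X, areas_A, free_cells), returned in insertion order.
def countObstaclesStep (c : Int × Int × Int) (cell : String) : Int × Int × Int :=
  let cell := PySem.Str.strip cell
  if cell = "X" ∨ cell = "x" then (c.1 + 1, c.2.1, c.2.2)
  else if cell = "A" then (c.1, c.2.1 + 1, c.2.2)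
  else if cell = "0" ∨ cell = "" then (c.1, c.2.1, c.2.2 + 1)
  else c

def count_obstacles (grid : List (List String)) : List (String × Int) :=
  let counts : Int × Int × Int := (0, 0, 0)
  let counts := grid.foldl (fun acc row => row.foldl countObstaclesStep acc) counts
  [("buildings_X", counts.1), ("areas_A", counts.2.1), ("free_cells", counts.2.2)]

-- ===== PORT B =====
def count_obstacles_alt (grid : List (List String)) : List (String × Int) :=
  let cells := (grid.flatMap (fun row => row)).map PySem.Str.strip
  [("buildings_X", (cells.countP (fun c => c = "X" || c = "x") : Int)),
   ("areas_A", PySem.List.count cells "A"),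
   ("free_cells", (cells.countP (fun c => c = "0" || c = "") : Int))]

-- ===== PRECONDITION & SPEC =====
def Spec_count_obstacles (grid : List (List String)) (out : List (String × Int)) : Prop := out = count_obstacles_alt grid
instance (grid : List (List String)) (out : List (String × Int)) : Decidable (Spec_count_obstacles grid out) := by unfold Spec_count_obstacles; infer_instance

-- ===== CLAIM (what is proved, stated in full; the proofs are below) =====
def Claim_equal_count_obstacles : Prop := ∀ (grid : List (List String)), Dom_count_obstacles grid → Spec_count_obstacles grid (count_obstacles grid)

-- ===== LEMMAS AND PROOFS =====

-- the fold over one list of cells adds the three per-category counts to the accumulator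
theorem countObstaclesStep_foldl (l : List String) (c : Int × Int × Int) :
    l.foldl countObstaclesStep c =
      (c.1 + ((l.map PySem.Str.strip).countP (fun s => s = "X" || s = "x") : Int),
       c.2.1 + ((l.map PySem.Str.strip).countP (fun s => s = "A") : Int),
       c.2.2 + ((l.map PySem.Str.strip).countP (fun s => s = "0" || s = "") : Int)) := by
  induction l generalizing c with
  | nil => simp
  | cons x xs ih =>
    simp only [List.foldl_cons, ih, List.map_cons, List.countP_cons]
    unfold countObstaclesStep
    rcases c with ⟨b, a, f⟩
    by_cases hx : PySem.Str.strip x = "X" ∨ PySem.Str.strip x = "x"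
    · have hA : ¬ PySem.Str.strip x = "A" := by rcases hx with h | h <;> simp [h]
      have h0 : ¬ (PySem.Str.strip x = "0" ∨ PySem.Str.strip x = "") := by
        rcases hx with h | h <;> simp [h]
      have hx' : (decide (PySem.Str.strip x = "X") || decide (PySem.Str.strip x = "x")) = true := by
        rcases hx with h | h <;> simp [h]
      simp only [if_pos hx, hx', hA, h0]
      simp [not_or.mp h0]
      omega
    · by_cases hA : PySem.Str.strip x = "A"
      · simp only [if_neg hx, if_pos hA]
        simp [hA]
        omega
      · by_cases h0 : PySem.Str.strip x = "0" ∨ PySem.Str.strip x = ""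
        · have h0' : (decide (PySem.Str.strip x = "0") || decide (PySem.Str.strip x = "")) = true := by
            rcases h0 with h | h <;> simp [h]
          simp only [if_neg hx, if_neg hA, if_pos h0, h0']
          simp [hA, not_or.mp hx]
          omega
        · simp only [if_neg hx, if_neg hA, if_neg h0]
          simp [hA, not_or.mp hx, not_or.mp h0]

theorem count_eq_countP (l : List String) :
    PySem.List.count l "A" = ((l.countP (fun s => s = "A") : Nat) : Int) := by
  simp only [PySem.List.count, List.count_eq_countP]
  have : (fun x : String => x == "A") = (fun s : String => decide (s = "A")) := by
    funext x; by_cases h : x = "A" <;> simp [h]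
  rw [this]

-- ===== VERDICT (by name: the statement is the Claim_ definition above) =====
theorem count_obstacles_spec : Claim_equal_count_obstacles := by
  intro grid _
  show count_obstacles grid = count_obstacles_alt grid
  simp only [count_obstacles, count_obstacles_alt]
  rw [← List.foldl_flatMap, countObstaclesStep_foldl, count_eq_countP]
  simp [List.countP_map, Function.comp_def]
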